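-- pv_equiv track=rewrite | github.com/Junyangz/leetcode | coding-test-campus/didi-coding-test1.py | solution
-- ===== SOURCE A (Python) =====
-- import collections
--
-- def solution(n, m, s):
--     ret = n // m + 1
--     for i in reversed(range(1, ret)):
--         cnt = collections.Counter(s[m * i:])
--         for j in range(n - m * i):
--             if cnt.most_common(1)[0][1] == n - m * i:
--                 ret = min(ret, i)
--                 break
--             cnt[s[j]] -= 1
--             cnt[s[j + m * i]] += 1
--     return ret
-- ===== SOURCE B (Python) =====
-- def solution(n, m, s):
--     ret = n // m + 1
--     for i in range(1, ret):
--         L = n - m * i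
--         if L <= 0:
--             continue
--         base = m * i
--         cnt = {}
--         for ch in s[base:]:
--             cnt[ch] = cnt.get(ch, 0) + 1
--         freq = {}
--         for v in cnt.values():
--             freq[v] = freq.get(v, 0) + 1
--         mx = max(cnt.values())
--         for j in range(L):
--             if mx == L:
--                 return i
--             c = s[j]
--             v = cnt.get(c, 0)
--             cnt[c] = v - 1
--             freq[v] = freq.get(v, 0) - 1
--             freq[v - 1] = freq.get(v - 1, 0) + 1
--             if v == mx and freq.get(mx, 0) == 0:
--                 mx -= 1
--             c = s[j + base]
--             v = cnt.get(c, 0)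
--             cnt[c] = v + 1
--             freq[v] = freq.get(v, 0) - 1
--             freq[v + 1] = freq.get(v + 1, 0) + 1
--             if v + 1 > mx:
--                 mx = v + 1
--     return ret
-- ===== Notes on version B (the rewrite author's own statement) =====
-- stated objective: faster
-- what changed: B replaces A's per-step Counter.most_common scan with an O(1) incrementally maintained maximum (cnt plus count-of-counts buckets freq), and searches i ascending with an early return instead of A's descending scan with a running min.
-- outside the precondition, e.g. on solution(6, 2, 'baaaa'): A returns 1, B returns 1
import Mathlib
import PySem

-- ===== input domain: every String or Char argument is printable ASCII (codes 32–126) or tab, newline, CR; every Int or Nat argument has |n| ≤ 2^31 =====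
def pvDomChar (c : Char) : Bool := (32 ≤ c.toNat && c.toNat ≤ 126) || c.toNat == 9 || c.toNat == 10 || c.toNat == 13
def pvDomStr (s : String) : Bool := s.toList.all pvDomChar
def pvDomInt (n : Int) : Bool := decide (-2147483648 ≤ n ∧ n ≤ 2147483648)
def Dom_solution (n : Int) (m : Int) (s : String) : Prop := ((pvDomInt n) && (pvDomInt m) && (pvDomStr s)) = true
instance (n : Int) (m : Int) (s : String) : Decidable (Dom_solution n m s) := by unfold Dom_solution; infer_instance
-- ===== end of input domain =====

-- B replaces A's per-step Counter.most_common scan by an O(1) incrementally maintained maximum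
-- (count-of-counts buckets) and an ascending first-hit search instead of the descending running min
-- (objective: faster by a constant factor — O(1) per step instead of a most_common scan; return value proved identical on Pre_solution).

-- ===== PORT A =====
-- cnt.most_common(1)[0][1] extracts the MAXIMUM of the counter's values (a tie affects only which key
-- is listed first, never this count); ported as max? over the values. '.getD 0' is the empty-counter
-- case, where Python raises IndexError — excluded by Pre_solution.
def aMost (cnt : PySem.Dict Char Int) : Int :=
  (PySem.List.max? cnt.values (fun v => v)).getD 0

-- 'for j in range(n - m*i)' with its break: recursion on the number k of remaining iterations.
-- s[j] / s[j + m*i] are pyGetD with a junk default: Pre_solution keeps both indexes in range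
-- (outside it Python raises IndexError). 'cnt[x] -= 1' on a Counter is d[x] = d.get(x, 0) - 1 = Dict.modify.
def aInner (cs : List Char) (mi L : Int) : Nat → Int → PySem.Dict Char Int → Bool
  | 0, _, _ => false
  | k + 1, j, cnt =>
    if aMost cnt = L then true
    else aInner cs mi L k (j + 1)
      ((cnt.modify (PySem.List.pyGetD cs j ' ') 0 (· - 1)).modify
        (PySem.List.pyGetD cs (j + mi) ' ') 0 (· + 1))

def solution (n : Int) (m : Int) (s : String) : Int :=
  let ret0 := PySem.Int.floordiv n m + 1   -- n // m ; m = 0 is Python's ZeroDivisionError, excluded by Pre_solution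
  (PySem.List.pyRange 1 ret0 1).reverse.foldl
    (fun ret i =>
      if aInner s.toList (m * i) (n - m * i) (n - m * i).toNat 0
           (PySem.Dict.counter (PySem.List.slice s.toList (some (m * i)) none)) then
        min ret i
      else ret)
    ret0

-- ===== PORT B =====
-- _dec in Source B: decrement cnt[c], move its bucket in freq, drop mx by one when the last key at mx left it.
def bDec (cnt : PySem.Dict Char Int) (freq : PySem.Dict Int Int) (mx : Int) (c : Char) :
    PySem.Dict Char Int × PySem.Dict Int Int × Int :=
  let v := cnt.getD c 0
  let cnt' := cnt.insert c (v - 1)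
  let f1 := freq.insert v (freq.getD v 0 - 1)
  let f2 := f1.insert (v - 1) (f1.getD (v - 1) 0 + 1)
  (cnt', f2, if v = mx ∧ f2.getD mx 0 = 0 then mx - 1 else mx)

-- _inc in Source B: increment cnt[c], move its bucket, raise mx when the new count beats it.
def bInc (cnt : PySem.Dict Char Int) (freq : PySem.Dict Int Int) (mx : Int) (c : Char) :
    PySem.Dict Char Int × PySem.Dict Int Int × Int :=
  let v := cnt.getD c 0
  let cnt' := cnt.insert c (v + 1)
  let f1 := freq.insert v (freq.getD v 0 - 1)
  let f2 := f1.insert (v + 1) (f1.getD (v + 1) 0 + 1)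
  (cnt', f2, if mx < v + 1 then v + 1 else mx)

-- Source B's inner 'for j in range(L)' with its 'return i' hit as the Bool result.
def bInner (cs : List Char) (mi L : Int) :
    Nat → Int → PySem.Dict Char Int → PySem.Dict Int Int → Int → Bool
  | 0, _, _, _, _ => false
  | k + 1, j, cnt, freq, mx =>
    if mx = L then true
    else
      let (cnt1, freq1, mx1) := bDec cnt freq mx (PySem.List.pyGetD cs j ' ')
      let (cnt2, freq2, mx2) := bInc cnt1 freq1 mx1 (PySem.List.pyGetD cs (j + mi) ' ')
      bInner cs mi L k (j + 1) cnt2 freq2 mx2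

-- one iteration of Source B's 'for i in range(1, ret)' body
def bCheck (cs : List Char) (n m : Int) (i : Int) : Bool :=
  let L := n - m * i
  if L ≤ 0 then false   -- 'continue'
  else
    let cnt := (PySem.List.slice cs (some (m * i)) none).foldl
      (fun d ch => d.insert ch (d.getD ch 0 + 1)) PySem.Dict.empty
    let freq := cnt.values.foldl (fun d v => d.insert v (d.getD v 0 + 1)) PySem.Dict.empty
    -- max(cnt.values()): ValueError on an empty sequence, excluded by Pre_solution ('.getD 0' unreachable there)
    let mx := (PySem.List.max? cnt.values (fun v => v)).getD 0
    bInner cs (m * i) L L.toNat 0 cnt freq mx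

def solution_alt (n : Int) (m : Int) (s : String) : Int :=
  let ret0 := PySem.Int.floordiv n m + 1
  ((PySem.List.pyRange 1 ret0 1).find? (fun i => bCheck s.toList n m i)).getD ret0

-- ===== PRECONDITION & SPEC =====
-- Pre_solution excludes m = 0 (Python ZeroDivisionError in n // m) and, unless every inner loop is
-- provably empty (n ≤ m or m < 0), inputs with n > len(s): there A's sliding window reads s past its
-- end and almost always raises IndexError; on the rare such inputs where an early break preempts the
-- crash A still returns, and B returns the same value there (see the claim's cites).
def Pre_solution (n : Int) (m : Int) (s : String) : Prop :=
  m ≠ 0 ∧ (n ≤ PySem.Str.len s ∨ n ≤ m ∨ m < 0)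
instance (n : Int) (m : Int) (s : String) : Decidable (Pre_solution n m s) := by
  unfold Pre_solution; infer_instance

def pvWitness_solution : Int × Int × String := (4, 2, "abab")

def Spec_solution (n : Int) (m : Int) (s : String) (out : Int) : Prop := out = solution_alt n m s
instance (n : Int) (m : Int) (s : String) (out : Int) : Decidable (Spec_solution n m s out) := by
  unfold Spec_solution; infer_instance

-- ===== CLAIM (what is proved, stated in full; the proofs are below) =====
def Claim_equal_solution : Prop := ∀ (n : Int) (m : Int) (s : String),
  Dom_solution n m s → Pre_solution n m s → Spec_solution n m s (solution n m s)

-- ===== LEMMAS AND PROOFS =====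

-- generic list facts ---------------------------------------------------------

lemma pvSumNonpos (l : List Int) (h : ∀ x ∈ l, x ≤ 0) : l.sum ≤ 0 := by
  induction l with
  | nil => simp
  | cons a t ih =>
    simp only [List.sum_cons]
    have := h a (by simp)
    have := ih (fun x hx => h x (by simp [hx]))
    omega

lemma pvSumMapUpd (K : List Char) (hK : K.Nodup) (c : Char) (hc : c ∈ K)
    (f g : Char → Int) (hoff : ∀ k, k ≠ c → f k = g k) :
    (K.map g).sum = (K.map f).sum - f c + g c := by
  induction K with
  | nil => simp at hc
  | cons a t ih =>
    rcases List.nodup_cons.mp hK with ⟨ha, ht⟩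
    by_cases hac : a = c
    · subst hac
      have : t.map g = t.map f := List.map_congr_left (fun k hk => (hoff k (by rintro rfl; exact ha hk)).symm)
      simp [this]; ring
    · have hct : c ∈ t := by
        rcases List.mem_cons.mp hc with h | h
        · exact absurd h.symm hac
        · exact h
      have := ih ht hct
      simp only [List.map_cons, List.sum_cons, this, hoff a hac]
      ring

lemma pvCountPUpd (K : List Char) (hK : K.Nodup) (c : Char) (hc : c ∈ K)
    (f g : Char → Int) (w : Int) (hoff : ∀ k, k ≠ c → f k = g k) :
    ((K.countP (fun k => decide (g k = w))) : Int)
      = ((K.countP (fun k => decide (f k = w))) : Int)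
        - (if f c = w then 1 else 0) + (if g c = w then 1 else 0) := by
  induction K with
  | nil => simp at hc
  | cons a t ih =>
    rcases List.nodup_cons.mp hK with ⟨ha, ht⟩
    by_cases hac : a = c
    · subst hac
      have hmap : t.countP (fun k => decide (g k = w)) = t.countP (fun k => decide (f k = w)) :=
        List.countP_congr (fun k hk => by rw [hoff k (by rintro rfl; exact ha hk)])
      simp only [List.countP_cons, hmap]
      push_cast
      split_ifs <;> simp_all
    · have hct : c ∈ t := by
        rcases List.mem_cons.mp hc with h | h
        · exact absurd h.symm hac
        · exact h
      have := ih ht hct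
      simp only [List.countP_cons, hoff a hac]
      push_cast at this ⊢
      omega

-- dict facts about a single cnt[c] = x update --------------------------------

lemma pvNotMemContains (d : PySem.Dict Char Int) (c : Char) (h : ¬ c ∈ d.keys) :
    d.contains c = false := by
  cases hh : d.contains c
  · rfl
  · exact absurd ((PySem.Dict.contains_iff_mem_keys d c).mp hh) h

lemma pvGetDInsert (d : PySem.Dict Char Int) (c : Char) (x : Int) (k : Char) :
    (d.insert c x).getD k 0 = if k = c then x else d.getD k 0 := by
  rw [PySem.Dict.getD_insert]

lemma pvValuesSumInsert (d : PySem.Dict Char Int) (hnd : d.keys.Nodup) (c : Char) (x : Int) :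
    (d.insert c x).values.sum = d.values.sum - d.getD c 0 + x := by
  by_cases hc : d.contains c = true
  · have hk := PySem.Dict.keys_insert_of_contains d x hc
    have hnd' : (d.insert c x).keys.Nodup := by rw [hk]; exact hnd
    rw [PySem.Dict.values_eq_map_keys (d.insert c x) hnd' 0,
        PySem.Dict.values_eq_map_keys d hnd 0, hk]
    have hcm : c ∈ d.keys := (PySem.Dict.contains_iff_mem_keys d c).mp hc
    have h := pvSumMapUpd d.keys hnd c hcm (fun k => d.getD k 0)
      (fun k => (d.insert c x).getD k 0) (fun k hk => by simp only [pvGetDInsert, if_neg hk])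
    beta_reduce at h
    rw [h, pvGetDInsert, if_pos rfl]
  · have hc' : d.contains c = false := by simpa using hc
    have hk := PySem.Dict.keys_insert_of_not_contains d x hc'
    have hcm : ¬ c ∈ d.keys := fun h =>
      by rw [(PySem.Dict.contains_iff_mem_keys d c).mpr h] at hc'; cases hc'
    have hnd' : (d.insert c x).keys.Nodup := by
      rw [hk]; exact List.Nodup.append hnd (List.nodup_singleton c) (by simpa using hcm)
    rw [PySem.Dict.values_eq_map_keys (d.insert c x) hnd' 0,
        PySem.Dict.values_eq_map_keys d hnd 0, hk]
    have hmap : d.keys.map (fun k => (d.insert c x).getD k 0) = d.keys.map (fun k => d.getD k 0) :=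
      List.map_congr_left (fun k hk' => by
        rw [pvGetDInsert, if_neg (by rintro rfl; exact hcm hk')])
    rw [List.map_append, List.sum_append, hmap, PySem.Dict.getD_of_not_contains d 0 hc']
    simp [pvGetDInsert]

lemma pvCountPInsert (d : PySem.Dict Char Int) (hnd : d.keys.Nodup) (c : Char) (x : Int)
    (w : Int) (hw : w ≠ 0) :
    (((d.insert c x).keys.countP (fun k => decide ((d.insert c x).getD k 0 = w))) : Int)
      = ((d.keys.countP (fun k => decide (d.getD k 0 = w))) : Int)
        - (if d.getD c 0 = w then 1 else 0) + (if x = w then 1 else 0) := by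
  by_cases hc : d.contains c = true
  · have hk := PySem.Dict.keys_insert_of_contains d x hc
    have hcm : c ∈ d.keys := (PySem.Dict.contains_iff_mem_keys d c).mp hc
    rw [hk]
    have h := pvCountPUpd d.keys hnd c hcm (fun k => d.getD k 0)
      (fun k => (d.insert c x).getD k 0) w (fun k hk => by simp only [pvGetDInsert, if_neg hk])
    beta_reduce at h
    rw [h, pvGetDInsert, if_pos rfl]
  · have hc' : d.contains c = false := by simpa using hc
    have hk := PySem.Dict.keys_insert_of_not_contains d x hc'
    have hcm : ¬ c ∈ d.keys := fun h =>
      by rw [(PySem.Dict.contains_iff_mem_keys d c).mpr h] at hc'; cases hc'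
    have h0 : d.getD c 0 = 0 := PySem.Dict.getD_of_not_contains d 0 hc'
    rw [hk]
    have hmap : d.keys.countP (fun k => decide ((d.insert c x).getD k 0 = w))
        = d.keys.countP (fun k => decide (d.getD k 0 = w)) :=
      List.countP_congr (fun k hk' => by
        rw [pvGetDInsert, if_neg (by rintro rfl; exact hcm hk')])
    rw [List.countP_append, hmap]
    simp only [List.countP_cons, List.countP_nil, pvGetDInsert, h0]
    push_cast
    split_ifs <;> simp_all

-- the loop invariant of B ----------------------------------------------------

def pvInv (cnt : PySem.Dict Char Int) (freq : PySem.Dict Int Int) (mx S : Int) : Prop :=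
  cnt.keys.Nodup ∧ cnt.values.sum = S ∧ (∀ c : Char, cnt.getD c 0 ≤ mx) ∧
  (∃ c : Char, cnt.getD c 0 = mx) ∧
  (∀ w : Int, w ≠ 0 →
    freq.getD w 0 = ((cnt.keys.countP (fun k => decide (cnt.getD k 0 = w))) : Int))

lemma pvMxPos (cnt : PySem.Dict Char Int) (mx S : Int)
    (hnd : cnt.keys.Nodup) (hsum : cnt.values.sum = S)
    (hb : ∀ c : Char, cnt.getD c 0 ≤ mx) (hS : 0 < S) : 1 ≤ mx := by
  by_contra hmx
  have hall : ∀ x ∈ cnt.values, x ≤ 0 := by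
    intro x hx
    rw [PySem.Dict.values_eq_map_keys cnt hnd 0] at hx
    obtain ⟨k, -, rfl⟩ := List.mem_map.mp hx
    have := hb k; omega
  have := pvSumNonpos cnt.values hall
  omega

lemma pvMemOfGetD (d : PySem.Dict Char Int) (c : Char) (h : d.getD c 0 ≠ 0) : c ∈ d.keys := by
  by_contra hm
  rw [PySem.Dict.getD_of_not_contains d 0 (pvNotMemContains d c hm)] at h
  exact h rfl

lemma pvMostEq (cnt : PySem.Dict Char Int) (freq : PySem.Dict Int Int) (mx S : Int)
    (h : pvInv cnt freq mx S) (hS : 0 < S) : aMost cnt = mx := by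
  obtain ⟨hnd, hsum, hb, ⟨cw, hcw⟩, -⟩ := h
  have hm1 : 1 ≤ mx := pvMxPos cnt mx S hnd hsum hb hS
  have hvne : cnt.values ≠ [] := by
    intro hv; rw [hv] at hsum; simp at hsum; omega
  obtain ⟨M, hM⟩ : ∃ M, PySem.List.max? cnt.values (fun v => v) = some M := by
    cases hmm : PySem.List.max? cnt.values (fun v => v) with
    | none => exact absurd ((PySem.List.max?_eq_none_iff _ _).mp hmm) hvne
    | some M => exact ⟨M, rfl⟩
  have hMmem := PySem.List.max?_mem hM
  have hMmax := PySem.List.max?_isMax hM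
  have hMle : M ≤ mx := by
    rw [PySem.Dict.values_eq_map_keys cnt hnd 0] at hMmem
    obtain ⟨k, -, hk⟩ := List.mem_map.mp hMmem
    have := hb k; omega
  have hcwk : cw ∈ cnt.keys := pvMemOfGetD cnt cw (by omega)
  have hmxv : mx ∈ cnt.values := by
    rw [PySem.Dict.values_eq_map_keys cnt hnd 0]
    exact List.mem_map.mpr ⟨cw, hcwk, hcw⟩
  have hmxle : mx ≤ M := by simpa using hMmax mx hmxv
  unfold aMost
  rw [hM]
  simp
  omega

lemma pvInvDec (cnt : PySem.Dict Char Int) (freq : PySem.Dict Int Int) (mx S : Int)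
    (h : pvInv cnt freq mx S) (hS : 0 < S) (c : Char) :
    pvInv (bDec cnt freq mx c).1 (bDec cnt freq mx c).2.1 (bDec cnt freq mx c).2.2 (S - 1) := by
  obtain ⟨hnd, hsum, hb, ⟨cw, hcw⟩, hf⟩ := h
  have hm1 : 1 ≤ mx := pvMxPos cnt mx S hnd hsum hb hS
  set v := cnt.getD c 0 with hv
  set F1 := freq.insert v (freq.getD v 0 - 1) with hF1
  set F2 := F1.insert (v - 1) (F1.getD (v - 1) 0 + 1) with hF2d
  show pvInv (cnt.insert c (v - 1)) F2 (if v = mx ∧ F2.getD mx 0 = 0 then mx - 1 else mx) (S - 1)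
  have hnd' : (cnt.insert c (v - 1)).keys.Nodup := PySem.Dict.nodup_keys_insert cnt c (v - 1) hnd
  have hgi := pvGetDInsert cnt c (v - 1)
  have hF2 : ∀ w : Int, F2.getD w 0 =
      if w = v - 1 then freq.getD (v - 1) 0 + 1
      else if w = v then freq.getD v 0 - 1 else freq.getD w 0 := by
    intro w
    rw [hF2d, hF1]
    rw [PySem.Dict.getD_insert, PySem.Dict.getD_insert, PySem.Dict.getD_insert]
    split_ifs <;> simp_all
  have hfreq' : ∀ w : Int, w ≠ 0 →
      F2.getD w 0 = (((cnt.insert c (v - 1)).keys.countP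
        (fun k => decide ((cnt.insert c (v - 1)).getD k 0 = w))) : Int) := by
    intro w hw
    rw [hF2 w, pvCountPInsert cnt hnd c (v - 1) w hw, ← hf w hw]
    by_cases h1 : w = v - 1
    · subst h1
      rw [hf (v - 1) hw]
      have hvne : ¬ (v = v - 1) := by omega
      split_ifs <;> omega
    · by_cases h2 : w = v
      · subst h2
        split_ifs <;> omega
      · split_ifs <;> omega
  refine ⟨hnd', ?_, ?_, ?_, hfreq'⟩
  · rw [pvValuesSumInsert cnt hnd c (v - 1), hsum, ← hv]; ring
  · -- bound
    by_cases hcase : v = mx ∧ F2.getD mx 0 = 0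
    · rw [if_pos hcase]
      obtain ⟨hvm, h0⟩ := hcase
      have hcnt0 : ((cnt.insert c (v - 1)).keys.countP
          (fun k => decide ((cnt.insert c (v - 1)).getD k 0 = mx))) = 0 := by
        have := hfreq' mx (by omega)
        omega
      intro c'
      rw [hgi c']
      split_ifs with hc'
      · omega
      · have hle := hb c'
        by_contra hgt
        have heq : cnt.getD c' 0 = mx := by omega
        have hmem : c' ∈ cnt.keys := pvMemOfGetD cnt c' (by omega)
        have hmem' : c' ∈ (cnt.insert c (v - 1)).keys :=
          (PySem.Dict.mem_keys_insert _ _ _ _).mpr (Or.inr hmem)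
        have := List.countP_eq_zero.mp hcnt0 c' hmem'
        rw [hgi c', if_neg hc'] at this
        simp [heq] at this
    · rw [if_neg hcase]
      intro c'
      rw [hgi c']
      split_ifs with hc'
      · have := hb c; omega
      · exact hb c'
  · -- attained
    by_cases hcase : v = mx ∧ F2.getD mx 0 = 0
    · rw [if_pos hcase]
      refine ⟨c, ?_⟩
      rw [hgi c, if_pos rfl]
      omega
    · rw [if_neg hcase]
      by_cases hvm : v = mx
      · have hne0 : F2.getD mx 0 ≠ 0 := fun h0 => hcase ⟨hvm, h0⟩
        have := hfreq' mx (by omega)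
        have hcp : ((cnt.insert c (v - 1)).keys.countP
            (fun k => decide ((cnt.insert c (v - 1)).getD k 0 = mx))) ≠ 0 := by omega
        have : ∃ k ∈ (cnt.insert c (v - 1)).keys,
            decide ((cnt.insert c (v - 1)).getD k 0 = mx) = true := by
          by_contra hno
          exact hcp (List.countP_eq_zero.mpr (fun k hk => by
            simpa using fun hkk => hno ⟨k, hk, by simpa using hkk⟩))
        obtain ⟨k, -, hk⟩ := this
        exact ⟨k, by simpa using hk⟩
      · refine ⟨cw, ?_⟩
        rw [hgi cw, if_neg (by rintro rfl; exact hvm hcw)]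
        exact hcw

lemma pvInvInc (cnt : PySem.Dict Char Int) (freq : PySem.Dict Int Int) (mx S : Int)
    (h : pvInv cnt freq mx S) (c : Char) :
    pvInv (bInc cnt freq mx c).1 (bInc cnt freq mx c).2.1 (bInc cnt freq mx c).2.2 (S + 1) := by
  obtain ⟨hnd, hsum, hb, ⟨cw, hcw⟩, hf⟩ := h
  set v := cnt.getD c 0 with hv
  set F1 := freq.insert v (freq.getD v 0 - 1) with hF1
  set F2 := F1.insert (v + 1) (F1.getD (v + 1) 0 + 1) with hF2d
  show pvInv (cnt.insert c (v + 1)) F2 (if mx < v + 1 then v + 1 else mx) (S + 1)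
  have hnd' : (cnt.insert c (v + 1)).keys.Nodup := PySem.Dict.nodup_keys_insert cnt c (v + 1) hnd
  have hgi := pvGetDInsert cnt c (v + 1)
  have hfreq' : ∀ w : Int, w ≠ 0 →
      F2.getD w 0 = (((cnt.insert c (v + 1)).keys.countP
        (fun k => decide ((cnt.insert c (v + 1)).getD k 0 = w))) : Int) := by
    intro w hw
    have hF2 : F2.getD w 0 =
        if w = v + 1 then freq.getD (v + 1) 0 + 1
        else if w = v then freq.getD v 0 - 1 else freq.getD w 0 := by
      rw [hF2d, hF1]
      rw [PySem.Dict.getD_insert, PySem.Dict.getD_insert, PySem.Dict.getD_insert]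
      split_ifs <;> simp_all
    rw [hF2, pvCountPInsert cnt hnd c (v + 1) w hw, ← hf w hw]
    by_cases h1 : w = v + 1
    · subst h1
      rw [hf (v + 1) hw]
      split_ifs <;> omega
    · by_cases h2 : w = v
      · subst h2
        split_ifs <;> omega
      · split_ifs <;> omega
  refine ⟨hnd', ?_, ?_, ?_, hfreq'⟩
  · rw [pvValuesSumInsert cnt hnd c (v + 1), hsum, ← hv]; ring
  · intro c'
    rw [hgi c']
    split_ifs with hc' hlt hlt
    · omega
    · omega
    · have := hb c'; omega
    · exact hb c'
  · by_cases hlt : mx < v + 1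
    · rw [if_pos hlt]
      exact ⟨c, by rw [hgi c, if_pos rfl]⟩
    · rw [if_neg hlt]
      refine ⟨cw, ?_⟩
      rw [hgi cw, if_neg ?_]
      · exact hcw
      · rintro rfl
        rw [hcw] at hv
        omega

lemma pvBisim (cs : List Char) (mi L S : Int) (hS : 0 < S) :
    ∀ (k : Nat) (j : Int) (cnt : PySem.Dict Char Int) (freq : PySem.Dict Int Int) (mx : Int),
      pvInv cnt freq mx S →
      bInner cs mi L k j cnt freq mx = aInner cs mi L k j cnt := by
  intro k
  induction k with
  | zero => intro j cnt freq mx _; rfl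
  | succ k ih =>
    intro j cnt freq mx h
    show (if mx = L then true else _) = (if aMost cnt = L then true else _)
    rw [pvMostEq cnt freq mx S h hS]
    by_cases hmx : mx = L
    · rw [if_pos hmx, if_pos hmx]
    · rw [if_neg hmx, if_neg hmx]
      have h1 := pvInvDec cnt freq mx S h hS (PySem.List.pyGetD cs j ' ')
      have h2 := pvInvInc _ _ _ _ h1 (PySem.List.pyGetD cs (j + mi) ' ')
      rw [sub_add_cancel] at h2
      exact ih (j + 1) _ _ _ h2

-- the initial state of B's inner loop satisfies the invariant -----------------

lemma pvInvInit (xs : List Char) (hne : xs ≠ []) :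
    pvInv (PySem.Dict.counter xs)
      ((PySem.Dict.counter xs).values.foldl (fun d v => d.insert v (d.getD v 0 + 1)) PySem.Dict.empty)
      ((PySem.List.max? (PySem.Dict.counter xs).values (fun v => v)).getD 0)
      ((PySem.Dict.counter xs).values.sum)
    ∧ 0 < (PySem.Dict.counter xs).values.sum := by
  have hnd : (PySem.Dict.counter xs).keys.Nodup := PySem.Dict.nodup_keys_counter xs
  have hvals : (PySem.Dict.counter xs).values
      = (PySem.Set.ofList xs).map (fun k => (xs.count k : Int)) := by
    have h := PySem.Dict.items_counter xs
    show ((PySem.Dict.counter xs).items).map (·.2) = _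
    rw [h, List.map_map]
    rfl
  have hpos : ∀ x ∈ (PySem.Dict.counter xs).values, 0 < x := by
    rw [hvals]
    intro x hx
    obtain ⟨k, hk, rfl⟩ := List.mem_map.mp hx
    have : k ∈ xs := (PySem.Set.mem_ofList _ _).mp hk
    exact_mod_cast List.count_pos_iff.mpr this
  have hvne : (PySem.Dict.counter xs).values ≠ [] := by
    rw [hvals]
    simp only [ne_eq, List.map_eq_nil_iff]
    intro hof
    rcases List.exists_mem_of_ne_nil xs hne with ⟨a, ha⟩
    have : a ∈ PySem.Set.ofList xs := (PySem.Set.mem_ofList _ _).mpr ha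
    rw [hof] at this
    simp at this
  have hSpos : 0 < (PySem.Dict.counter xs).values.sum := List.sum_pos _ hpos hvne
  obtain ⟨M, hM⟩ : ∃ M, PySem.List.max? (PySem.Dict.counter xs).values (fun v => v) = some M := by
    cases hmm : PySem.List.max? (PySem.Dict.counter xs).values (fun v => v) with
    | none => exact absurd ((PySem.List.max?_eq_none_iff _ _).mp hmm) hvne
    | some M => exact ⟨M, rfl⟩
  have hMmem := PySem.List.max?_mem hM
  have hMmax := PySem.List.max?_isMax hM
  have hM0 : 0 < M := hpos M hMmem
  refine ⟨⟨hnd, rfl, ?_, ?_, ?_⟩, hSpos⟩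
  · -- bound
    intro c
    rw [hM]
    simp only [Option.getD_some]
    rw [PySem.Dict.getD_counter]
    by_cases hc : c ∈ xs
    · have hmem : ((xs.count c : Int)) ∈ (PySem.Dict.counter xs).values := by
        rw [hvals]
        exact List.mem_map.mpr ⟨c, (PySem.Set.mem_ofList _ _).mpr hc, rfl⟩
      simpa using hMmax _ hmem
    · rw [List.count_eq_zero.mpr hc]
      push_cast
      omega
  · -- attained
    rw [hM]
    simp only [Option.getD_some]
    rw [hvals] at hMmem
    obtain ⟨k, -, hk⟩ := List.mem_map.mp hMmem
    exact ⟨k, by rw [PySem.Dict.getD_counter, hk]⟩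
  · -- freq
    intro w hw
    rw [PySem.Dict.foldl_insert_getD_add_one_eq_counter, PySem.Dict.getD_counter]
    congr 1
    rw [PySem.Dict.values_eq_map_keys _ hnd 0]
    rw [List.count_eq_countP, List.countP_map]
    refine List.countP_congr (fun k _ => ?_)
    simp only [Function.comp_apply, beq_iff_eq]
    simp

-- the outer loops ------------------------------------------------------------

lemma pvRangePW (b : Int) : ∀ (nn : Nat) (a : Int), (b - a).toNat = nn →
    (PySem.List.pyRange a b 1).Pairwise (· < ·) := by
  intro nn
  induction nn with
  | zero =>
    intro a ha
    have hba : b ≤ a := by omega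
    have : PySem.List.pyRange a b 1 = [] := by simp [PySem.List.pyRange]; omega
    simp [this]
  | succ k ih =>
    intro a ha
    have hab : a < b := by omega
    rw [PySem.List.pyRange_one_cons hab]
    refine List.Pairwise.cons ?_ (ih (a + 1) (by omega))
    intro i hi
    have := PySem.List.mem_pyRange_one.mp hi
    omega

lemma pvFoldMin (Q : Int → Bool) : ∀ (l : List Int) (R : Int),
    l.Pairwise (· < ·) → (∀ i ∈ l, i < R) →
    l.reverse.foldl (fun r i => if Q i then min r i else r) R = (l.find? Q).getD R := by
  intro l
  induction l with
  | nil => intro R _ _; rfl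
  | cons x t ih =>
    intro R hpw hlt
    rcases List.pairwise_cons.mp hpw with ⟨hx, hpt⟩
    have hr' := ih R hpt (fun i hi => hlt i (by simp [hi]))
    simp only [List.reverse_cons, List.foldl_append, List.foldl_cons, List.foldl_nil, hr']
    cases hQ : Q x
    · rw [List.find?_cons_of_neg (by simp [hQ])]
      simp
    · rw [List.find?_cons_of_pos hQ]
      simp only [reduceIte]
      cases hf : t.find? Q with
      | none =>
        simp only [Option.getD_none, Option.getD_some]
        exact min_eq_right (le_of_lt (hlt x (by simp)))
      | some i =>
        have hit : i ∈ t := List.mem_of_find?_eq_some hf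
        simp only [Option.getD_some]
        exact min_eq_right (le_of_lt (hx i hit))

lemma pvFindCongr (f g : Int → Bool) : ∀ (l : List Int), (∀ i ∈ l, f i = g i) →
    l.find? f = l.find? g := by
  intro l
  induction l with
  | nil => intro _; rfl
  | cons x t ih =>
    intro h
    have hx := h x (by simp)
    cases hg : g x
    · rw [List.find?_cons_of_neg (by simp [hx, hg]), List.find?_cons_of_neg (by simp [hg])]
      exact ih (fun i hi => h i (by simp [hi]))
    · rw [List.find?_cons_of_pos (by simp [hx, hg]), List.find?_cons_of_pos hg]

-- per-i equality of the two inner computations --------------------------------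

lemma pvCheckEq (n m : Int) (s : String) (hpre : Pre_solution n m s) (i : Int)
    (hi : i ∈ PySem.List.pyRange 1 (PySem.Int.floordiv n m + 1) 1) :
    (aInner s.toList (m * i) (n - m * i) (n - m * i).toNat 0
       (PySem.Dict.counter (PySem.List.slice s.toList (some (m * i)) none)))
      = bCheck s.toList n m i := by
  obtain ⟨hm0, hdisj⟩ := hpre
  obtain ⟨hi1, hi2⟩ := PySem.List.mem_pyRange_one.mp hi
  show _ = (if n - m * i ≤ 0 then false else _)
  by_cases hL : n - m * i ≤ 0
  · rw [if_pos hL]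
    have ht : (n - m * i).toNat = 0 := by omega
    rw [ht]
    rfl
  · rw [if_neg hL]
    replace hL : 0 < n - m * i := by omega
    have hm : 1 ≤ m := by
      rcases lt_trichotomy m 0 with hmneg | hz | hpos
      · exfalso
        have hfd : PySem.Int.floordiv n m * m + PySem.Int.mod n m = n :=
          PySem.Int.floordiv_mul_add_mod n m
        have hmod := PySem.Int.mod_neg_bounds n hmneg
        have hile : i ≤ PySem.Int.floordiv n m := by omega
        have hmul : m * (PySem.Int.floordiv n m) ≤ m * i :=
          mul_le_mul_of_nonpos_left hile (le_of_lt hmneg)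
        have hcm : PySem.Int.floordiv n m * m = m * (PySem.Int.floordiv n m) := mul_comm _ _
        linarith [hmod.2]
      · exact absurd hz hm0
      · omega
    have hnlen : n ≤ (s.toList.length : Int) := by
      rcases hdisj with h | h | h
      · rwa [PySem.Str.len_eq] at h
      · exfalso
        have hmi : m * 1 ≤ m * i := mul_le_mul_of_nonneg_left hi1 (by omega)
        rw [mul_one] at hmi
        linarith
      · omega
    have hmi0 : 0 ≤ m * i := mul_nonneg (by omega) (by omega)
    have hmilt : m * i < (s.toList.length : Int) := by linarith
    have hsl : PySem.List.slice s.toList (some (m * i)) none = s.toList.drop (m * i).toNat := by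
      conv_lhs => rw [← Int.toNat_of_nonneg hmi0]
      exact PySem.List.slice_from_natCast _ _
    have hne : PySem.List.slice s.toList (some (m * i)) none ≠ [] := by
      rw [hsl, Ne, List.drop_eq_nil_iff]
      intro hlen
      have h1 : (s.toList.length : Int) ≤ ((m * i).toNat : Int) := by exact_mod_cast hlen
      rw [Int.toNat_of_nonneg hmi0] at h1
      linarith
    rw [PySem.Dict.foldl_insert_getD_add_one_eq_counter]
    obtain ⟨hinv, hSpos⟩ := pvInvInit _ hne
    exact (pvBisim s.toList (m * i) (n - m * i) _ hSpos _ 0 _ _ _ hinv).symm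

-- ===== VERDICT (by name: the statement is the Claim_ definition above) =====
theorem solution_spec : Claim_equal_solution := by
  intro n m s hdom hpre
  show solution n m s = solution_alt n m s
  rw [show solution n m s
      = (PySem.List.pyRange 1 (PySem.Int.floordiv n m + 1) 1).reverse.foldl
          (fun ret i =>
            if aInner s.toList (m * i) (n - m * i) (n - m * i).toNat 0
                 (PySem.Dict.counter (PySem.List.slice s.toList (some (m * i)) none)) then
              min ret i
            else ret)
          (PySem.Int.floordiv n m + 1) from rfl]
  rw [show solution_alt n m s
      = ((PySem.List.pyRange 1 (PySem.Int.floordiv n m + 1) 1).find?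
          (fun i => bCheck s.toList n m i)).getD (PySem.Int.floordiv n m + 1) from rfl]
  rw [pvFoldMin _ _ _ (pvRangePW _ _ 1 rfl)
        (fun i hi => (PySem.List.mem_pyRange_one.mp hi).2)]
  rw [pvFindCongr _ _ _ (fun i hi => pvCheckEq n m s hpre i hi)]
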